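-- pv_equiv track=rewrite | github.com/BonfantiStefano/AdventOfCode | 2024/Day12/Day12.py | check_dimensions
-- ===== SOURCE A (Python) =====
-- def check_dimensions(matrix: list[list[int]], dim1: int, dim2: int) -> list[int]:
--     sizes = []
--
--     for i in range(dim1-1):
--         difference_row = [matrix[i+1][j] - matrix[i][j] for j in range(dim2)]
--         j = 0
--         while j < dim2:
--             if difference_row[j] == 1:
--                 size = 1
--                 for k in range(j+1, dim2):
--                     if difference_row[k] == 1:
--                         size += 1
--                     else:
--                         break
--                 sizes.append(size)
--                 j += size
--             elif difference_row[j] == -1: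
--                 size = 1
--                 for k in range(j + 1, dim2):
--                     if difference_row[k] == -1:
--                         size += 1
--                     else:
--                         break
--                 sizes.append(size)
--                 j += size
--             else:
--                 j += 1
--     return sizes
-- ===== SOURCE B (Python) =====
-- def check_dimensions(matrix: list[list[int]], dim1: int, dim2: int) -> list[int]:
--     sizes = []
--     for i in range(dim1 - 1):
--         diff = [matrix[i + 1][j] - matrix[i][j] for j in range(dim2)]
--         if diff:
--             # boundary indices where the value changes, plus both ends
--             bounds = [0] + [j for j in range(1, dim2) if diff[j] != diff[j - 1]] + [dim2]
--             for a, b in zip(bounds, bounds[1:]):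
--                 if diff[a] in (1, -1):
--                     sizes.append(b - a)
--     return sizes
-- ===== Notes on version B (the rewrite author's own statement) =====
-- stated objective: alternative
-- what changed: Instead of A's while-loop that scans each run with inner counting loops and jumps j by the run length, B computes for each difference row the list of boundary positions (indices where the value changes, plus both ends) and obtains each run length as the difference of two consecutive boundaries, keeping it when the value at the left boundary is 1 or -1.
import Mathlib
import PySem

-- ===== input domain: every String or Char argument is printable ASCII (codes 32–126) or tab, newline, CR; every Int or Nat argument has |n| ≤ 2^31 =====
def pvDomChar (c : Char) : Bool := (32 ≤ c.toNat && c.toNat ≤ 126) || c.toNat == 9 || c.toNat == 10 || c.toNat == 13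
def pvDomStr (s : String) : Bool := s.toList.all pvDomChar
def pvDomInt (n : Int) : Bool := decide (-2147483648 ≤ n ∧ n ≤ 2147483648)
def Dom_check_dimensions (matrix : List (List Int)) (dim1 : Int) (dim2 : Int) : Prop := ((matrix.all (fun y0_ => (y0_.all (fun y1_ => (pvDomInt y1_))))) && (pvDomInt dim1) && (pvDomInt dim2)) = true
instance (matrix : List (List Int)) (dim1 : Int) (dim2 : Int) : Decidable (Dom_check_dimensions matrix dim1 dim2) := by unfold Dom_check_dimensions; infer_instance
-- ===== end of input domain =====

-- B replaces A's while-loop run scanning (inner counting loops, j += size) by computing,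
-- per difference row, the boundary positions where the value changes and taking run
-- lengths as differences of consecutive boundaries; objective: alternative, same cost.

-- ===== PORT A =====

-- A's inner 'for k in range(j+1, dim2): if difference_row[k]==v: size+=1 else: break'
-- (returns the number of consecutive entries equal to v starting at index k)
def pvCnt (d : List Int) (v : Int) (k dim2 : Int) : Int :=
  if _h : k < dim2 then
    if (PySem.List.pyGet? d k).getD 0 = v then 1 + pvCnt d v (k + 1) dim2 else 0
  else 0
termination_by (dim2 - k).toNat
decreasing_by omega

theorem pvCnt_nonneg : ∀ (n : Nat) (d : List Int) (v k L : Int), (L - k).toNat = n → 0 ≤ pvCnt d v k L := by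
  intro n
  induction n using Nat.strong_induction_on with
  | _ n ih =>
    intro d v k L hn
    rw [pvCnt]
    split
    · split
      · have := ih ((L - (k + 1)).toNat) (by omega) d v (k + 1) L rfl
        omega
      · omega
    · omega

def pvWhile (d : List Int) (dim2 : Int) (j : Int) (sizes : List Int) : List Int :=
  if _h : j < dim2 then
    if (PySem.List.pyGet? d j).getD 0 = 1 then
      pvWhile d dim2 (j + (1 + pvCnt d 1 (j + 1) dim2)) (sizes ++ [1 + pvCnt d 1 (j + 1) dim2])
    else if (PySem.List.pyGet? d j).getD 0 = -1 then
      pvWhile d dim2 (j + (1 + pvCnt d (-1) (j + 1) dim2)) (sizes ++ [1 + pvCnt d (-1) (j + 1) dim2])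
    else pvWhile d dim2 (j + 1) sizes
  else sizes
termination_by (dim2 - j).toNat
decreasing_by
  · have := pvCnt_nonneg ((dim2 - (j + 1)).toNat) d 1 (j + 1) dim2 rfl
    omega
  · have := pvCnt_nonneg ((dim2 - (j + 1)).toNat) d (-1) (j + 1) dim2 rfl
    omega
  · omega

-- matrix[i+1][j] - matrix[i][j] for j in range(dim2)  (this comprehension line occurs
-- verbatim in both Pythons; indices are all nonnegative, the .getD defaults are reached
-- only outside Pre_check_dimensions)
def pvDiffRow (matrix : List (List Int)) (i dim2 : Int) : List Int :=
  (PySem.List.pyRange 0 dim2 1).map (fun j =>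
    PySem.List.pyGetD ((PySem.List.pyGet? matrix (i + 1)).getD []) j 0 -
    PySem.List.pyGetD ((PySem.List.pyGet? matrix i).getD []) j 0)

def check_dimensions (matrix : List (List Int)) (dim1 : Int) (dim2 : Int) : List Int :=
  (PySem.List.pyRange 0 (dim1 - 1) 1).foldl
    (fun sizes i => pvWhile (pvDiffRow matrix i dim2) dim2 0 sizes) []

-- ===== PORT B =====

-- B's loop body for one row pair: boundary positions ('[0] + [j for j in range(1, dim2)
-- if diff[j] != diff[j-1]] + [dim2]'), then lengths as differences of consecutive bounds
def pvRowB (matrix : List (List Int)) (i dim2 : Int) (sizes : List Int) : List Int :=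
  let diff := pvDiffRow matrix i dim2
  if diff ≠ [] then
    let bounds := [0] ++ ((PySem.List.pyRange 1 dim2 1).filter (fun j =>
        (PySem.List.pyGet? diff j).getD 0 != (PySem.List.pyGet? diff (j - 1)).getD 0)) ++ [dim2]
    (bounds.zip (bounds.drop 1)).foldl
      (fun acc ab =>
        if (PySem.List.pyGet? diff ab.1).getD 0 = 1 ∨ (PySem.List.pyGet? diff ab.1).getD 0 = -1
        then acc ++ [ab.2 - ab.1] else acc) sizes
  else sizes

def check_dimensions_alt (matrix : List (List Int)) (dim1 : Int) (dim2 : Int) : List Int :=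
  (PySem.List.pyRange 0 (dim1 - 1) 1).foldl
    (fun sizes i => pvRowB matrix i dim2 sizes) []

-- ===== PRECONDITION & SPEC =====
-- Pre_ excludes exactly the inputs where A raises IndexError: the loop runs (dim1 ≥ 2)
-- and a row among the first dim1 is missing or shorter than dim2 (dim2 ≥ 1).
def Pre_check_dimensions (matrix : List (List Int)) (dim1 : Int) (dim2 : Int) : Prop :=
  2 ≤ dim1 → 1 ≤ dim2 → (dim1 ≤ matrix.length ∧ ∀ row ∈ matrix.take dim1.toNat, dim2 ≤ row.length)
instance (matrix : List (List Int)) (dim1 : Int) (dim2 : Int) : Decidable (Pre_check_dimensions matrix dim1 dim2) := by unfold Pre_check_dimensions; infer_instance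

def pvWitness_check_dimensions : List (List Int) × Int × Int := ([[1, 2], [2, 3], [1, 2]], 3, 2)

def Spec_check_dimensions (matrix : List (List Int)) (dim1 : Int) (dim2 : Int) (out : List Int) : Prop := out = check_dimensions_alt matrix dim1 dim2
instance (matrix : List (List Int)) (dim1 : Int) (dim2 : Int) (out : List Int) : Decidable (Spec_check_dimensions matrix dim1 dim2 out) := by unfold Spec_check_dimensions; infer_instance

-- ===== CLAIM (what is proved, stated in full; the proofs are below) =====
def Claim_equal_check_dimensions : Prop := ∀ (matrix : List (List Int)) (dim1 : Int) (dim2 : Int), Dom_check_dimensions matrix dim1 dim2 → Pre_check_dimensions matrix dim1 dim2 → Spec_check_dimensions matrix dim1 dim2 (check_dimensions matrix dim1 dim2)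

-- ===== LEMMAS AND PROOFS =====

-- proof-only helper: the (value, run length) pairs of the maximal runs — the normal
-- form through which A's while loop and B's boundary differences are compared
def pvRuns (l : List Int) : List (Int × Int) :=
  match l with
  | [] => []
  | x :: xs => (x, 1 + ((xs.takeWhile (· == x)).length : Int)) :: pvRuns (xs.dropWhile (· == x))
termination_by l.length
decreasing_by
  have := List.length_dropWhile_le (· == x) xs
  simp only [List.length_cons]
  omega

def pvChg (d : List Int) : List Int :=
  (PySem.List.pyRange 1 (d.length : Int) 1).filter (fun j =>
    (PySem.List.pyGet? d j).getD 0 != (PySem.List.pyGet? d (j - 1)).getD 0)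

theorem pyRange_one_shift (b : Int) (hb : 1 ≤ b) :
    PySem.List.pyRange 1 (b + 1) 1 = 1 :: (PySem.List.pyRange 1 b 1).map (· + 1) := by
  rw [PySem.List.pyRange_one, PySem.List.pyRange_one]
  have h1 : (b + 1 - 1).toNat = (b - 1).toNat + 1 := by omega
  rw [h1, List.range_succ_eq_map]
  simp [List.map_map, Function.comp_def]
  intro a _
  ring

theorem pvChg_nil : pvChg [] = [] := by decide

theorem pvChg_singleton (x : Int) : pvChg [x] = [] := by
  simp [pvChg]

theorem pvChg_cons (x y : Int) (ys : List Int) :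
    pvChg (x :: y :: ys) = (if (y != x) then [1] else []) ++ (pvChg (y :: ys)).map (· + 1) := by
  have hlen : (((x :: y :: ys).length : Int)) = ((y :: ys).length : Int) + 1 := by simp
  have hb : (1 : Int) ≤ ((y :: ys).length : Int) := by simp
  rw [pvChg, hlen, pyRange_one_shift _ hb, List.filter_cons, List.filter_map]
  have hhead : ((PySem.List.pyGet? (x :: y :: ys) 1).getD 0 != (PySem.List.pyGet? (x :: y :: ys) (1 - 1)).getD 0) = (y != x) := by
    norm_num
  rw [hhead]
  have hcong : ((PySem.List.pyRange 1 ((y :: ys).length : Int) 1).filter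
        ((fun j => (PySem.List.pyGet? (x :: y :: ys) j).getD 0 != (PySem.List.pyGet? (x :: y :: ys) (j - 1)).getD 0) ∘ (· + 1))) =
      ((PySem.List.pyRange 1 ((y :: ys).length : Int) 1).filter
        (fun j => (PySem.List.pyGet? (y :: ys) j).getD 0 != (PySem.List.pyGet? (y :: ys) (j - 1)).getD 0)) := by
    apply List.filter_congr
    intro j hj
    rw [PySem.List.mem_pyRange_one] at hj
    simp only [Function.comp_apply]
    have e1 : PySem.List.pyGet? (x :: y :: ys) (j + 1) = PySem.List.pyGet? (y :: ys) j := by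
      rw [PySem.List.pyGet?_of_nonneg _ (by omega), PySem.List.pyGet?_of_nonneg _ (by omega)]
      have : (j + 1).toNat = j.toNat + 1 := by omega
      rw [this, List.getElem?_cons_succ]
    have e2 : PySem.List.pyGet? (x :: y :: ys) (j + 1 - 1) = PySem.List.pyGet? (y :: ys) (j - 1) := by
      have h3 : j + 1 - 1 = (j - 1) + 1 := by ring
      rw [h3, PySem.List.pyGet?_of_nonneg _ (by omega), PySem.List.pyGet?_of_nonneg _ (by omega)]
      have : (j - 1 + 1).toNat = (j - 1).toNat + 1 := by omega
      rw [this, List.getElem?_cons_succ]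
    rw [e1, e2]
  rw [hcong, pvChg]
  split <;> rfl

theorem pvChg_run (x : Int) (xs : List Int) :
    pvChg (x :: xs) =
      (if xs.dropWhile (· == x) = [] then [] else [1 + ((xs.takeWhile (· == x)).length : Int)]) ++
      (pvChg (xs.dropWhile (· == x))).map (· + (1 + ((xs.takeWhile (· == x)).length : Int))) := by
  induction xs generalizing x with
  | nil => simp [pvChg_singleton, pvChg_nil]
  | cons y ys ih =>
    by_cases hy : y = x
    · subst hy
      rw [pvChg_cons, if_neg (by simp)]
      rw [ih y]
      simp only [List.takeWhile_cons, List.dropWhile_cons, beq_self_eq_true, if_true]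
      by_cases hrn : List.dropWhile (fun x => x == y) ys = []
      · simp [hrn]; intro a _; ring
      · rw [if_neg hrn, if_neg hrn]
        simp only [List.nil_append, List.map_append, List.map_map, List.map_cons,
          Function.comp_def, List.length_cons]
        refine congrArg₂ (· ++ ·) ?_ ?_
        · push_cast; norm_num; ring
        · apply List.map_congr_left; intro a _; push_cast; ring
    · rw [pvChg_cons, if_pos (by simp [hy]),
        List.takeWhile_cons_of_neg (by simp [hy]), List.dropWhile_cons_of_neg (by simp [hy])]
      norm_num
      rw [if_neg (List.cons_ne_nil _ _)]
      rfl

def pvBnds (d : List Int) : List Int := 0 :: pvChg d ++ [(d.length : Int)]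

def pvPairs (d : List Int) : List (Int × Int) := (pvBnds d).zip ((pvBnds d).drop 1)

theorem mem_pvBnds_nonneg (d : List Int) (a : Int) (h : a ∈ pvBnds d) : 0 ≤ a := by
  rcases List.mem_cons.mp h with h0 | h1
  · omega
  rcases List.mem_append.mp h1 with h2 | h3
  · simp only [pvChg] at h2
    have := (PySem.List.mem_pyRange_one).mp (List.mem_filter.mp h2).1
    omega
  · simp at h3; omega

theorem pyGet?_append_shift (t r : List Int) (a : Int) (ha : 0 ≤ a) :
    PySem.List.pyGet? (t ++ r) (a + (t.length : Int)) = PySem.List.pyGet? r a := by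
  rw [PySem.List.pyGet?_of_nonneg _ (by omega), PySem.List.pyGet?_of_nonneg _ ha]
  have h1 : (a + (t.length : Int)).toNat = t.length + a.toNat := by omega
  rw [h1, List.getElem?_append_right (by omega)]
  congr 1
  omega

theorem pairs_map_shift (bs : List Int) (c : Int) :
    ((bs.map (· + c)).zip ((bs.map (· + c)).drop 1)) =
      (bs.zip (bs.drop 1)).map (Prod.map (· + c) (· + c)) := by
  rw [← List.map_drop, List.zip_map]

theorem pvRuns_main : ∀ (n : Nat) (d : List Int), d.length = n →
    ((pvPairs d).filter (fun ab => decide ((PySem.List.pyGet? d ab.1).getD 0 = 1 ∨ (PySem.List.pyGet? d ab.1).getD 0 = -1))).map (fun ab => ab.2 - ab.1) =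
    ((pvRuns d).filter (fun kc => decide (kc.1 = 1 ∨ kc.1 = -1))).map (·.2) := by
  intro n
  induction n using Nat.strong_induction_on with
  | _ n ih =>
    intro d hd
    match d with
    | [] => rw [pvRuns]; simp [pvPairs, pvBnds, pvChg_nil, PySem.List.pyGet?]
    | x :: xs =>
      have hlsum : (xs.takeWhile (· == x)).length + (xs.dropWhile (· == x)).length = xs.length := by
        conv_rhs => rw [← List.takeWhile_append_dropWhile (p := (· == x)) (l := xs)]
        rw [List.length_append]
      set t := xs.takeWhile (· == x) with htdef
      set r := xs.dropWhile (· == x) with hrdef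
      set c : Int := 1 + (t.length : Int) with hcdef
      have hruns : pvRuns (x :: xs) = (x, c) :: pvRuns r := by rw [pvRuns]
      have hget0 : (PySem.List.pyGet? (x :: xs) 0).getD 0 = x := by
        rw [PySem.List.pyGet?_zero_cons]; rfl
      by_cases hrn : r = []
      · -- the whole tail is one run of x
        have hbnds : pvBnds (x :: xs) = [0, c] := by
          have h0 : t.length = xs.length := by
            have hr0 : r.length = 0 := by simp [hrn]
            omega
          simp [pvBnds, pvChg_run, ← htdef, ← hrdef, hrn, pvChg_nil]
          omega
        have hpairs : pvPairs (x :: xs) = [(0, c)] := by rw [pvPairs, hbnds]; rfl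
        rw [hpairs, hruns, hrn]
        simp [pvRuns, List.filter_cons]
        by_cases hx : x = 1 ∨ x = -1
        · rw [if_pos (by simpa using hx), if_pos (by simpa using hx)]; simp
        · rw [if_neg (by simpa using hx), if_neg (by simpa using hx)]
          rfl
      · -- peel off the first run, shift the rest
        have hbnds : pvBnds (x :: xs) = 0 :: (pvBnds r).map (· + c) := by
          have hlen2 : (((x :: xs).length : Int)) = (r.length : Int) + c := by
            simp only [List.length_cons, hcdef]; push_cast; omega
          rw [pvBnds, pvChg_run, ← htdef, ← hrdef, if_neg hrn, hlen2, pvBnds]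
          simp
          exact ⟨hcdef.symm, fun a _ => hcdef.symm⟩
        have hpairs : pvPairs (x :: xs) = (0, c) :: (pvPairs r).map (Prod.map (· + c) (· + c)) := by
          rw [pvPairs, hbnds]
          have hb0 : (pvBnds r).map (· + c) = c :: ((pvChg r ++ [(r.length : Int)]).map (· + c)) := by
            simp [pvBnds]
          rw [hb0]
          simp only [List.drop_succ_cons, List.drop_zero, List.zip_cons_cons]
          rw [← hb0]
          rw [show (pvChg r ++ [(r.length : Int)]).map (· + c) = ((pvBnds r).map (· + c)).drop 1 from by simp [pvBnds]]
          rw [pairs_map_shift]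
          rfl
        have hshift : ∀ ab ∈ pvPairs r,
            PySem.List.pyGet? (x :: xs) (ab.1 + c) = PySem.List.pyGet? r ab.1 := by
          intro ab hab
          have ha : ab.1 ∈ pvBnds r := (List.of_mem_zip hab).1
          have hnn : 0 ≤ ab.1 := mem_pvBnds_nonneg r ab.1 ha
          have hdecomp : x :: xs = (x :: t) ++ r := by
            simp [htdef, hrdef]
          have hc : c = ((x :: t).length : Int) := by simp [hcdef]; omega
          rw [hdecomp, hc, pyGet?_append_shift _ _ _ hnn]
        rw [hpairs, hruns]
        simp only [List.filter_cons]
        have hg0 : (PySem.List.pyGet? (x :: xs) (0 : Int)).getD 0 = x := hget0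
        have hfilter_tail :
            ((pvPairs r).map (Prod.map (· + c) (· + c))).filter (fun ab => decide ((PySem.List.pyGet? (x :: xs) ab.1).getD 0 = 1 ∨ (PySem.List.pyGet? (x :: xs) ab.1).getD 0 = -1)) =
            ((pvPairs r).filter (fun ab => decide ((PySem.List.pyGet? r ab.1).getD 0 = 1 ∨ (PySem.List.pyGet? r ab.1).getD 0 = -1))).map (Prod.map (· + c) (· + c)) := by
          rw [List.filter_map]
          congr 1
          apply List.filter_congr
          intro ab hab
          simp only [Function.comp_apply, Prod.map_fst, hshift ab hab]
        have hlen_r : r.length < n := by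
          have h1 : t.length + r.length = xs.length := hlsum
          have h2 : xs.length + 1 = n := by simpa using hd
          omega
        have hih := ih r.length hlen_r r rfl
        by_cases hx : x = 1 ∨ x = -1
        · rw [if_pos (by simpa [hg0] using hx), if_pos (by simpa using hx)]
          rw [hfilter_tail]
          simp only [List.map_cons, List.map_map]
          congr 1
          rw [← hih]
          apply List.map_congr_left
          intro ab _
          obtain ⟨a, b⟩ := ab
          simp [Prod.map]
        · rw [if_neg (by simpa [hg0] using hx), if_neg (by simpa using hx)]
          rw [hfilter_tail]
          simp only [List.map_map]
          rw [← hih]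
          apply List.map_congr_left
          intro ab _
          obtain ⟨a, b⟩ := ab
          simp [Prod.map]

theorem pvCnt_shift (v : Int) : ∀ (n : Nat) (x : Int) (xs : List Int) (k L : Int), (L - k).toNat = n → 0 ≤ k → pvCnt (x :: xs) v (k + 1) (L + 1) = pvCnt xs v k L := by
  intro n
  induction n using Nat.strong_induction_on with
  | _ n ih =>
    intro x xs k L hn hk
    by_cases h : k < L
    · conv_lhs => rw [pvCnt]
      conv_rhs => rw [pvCnt]
      rw [dif_pos (by omega : k + 1 < L + 1), dif_pos h]
      have hget : (PySem.List.pyGet? (x :: xs) (k + 1)).getD 0 = (PySem.List.pyGet? xs k).getD 0 := by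
        rw [PySem.List.pyGet?_of_nonneg _ (by omega), PySem.List.pyGet?_of_nonneg _ hk]
        have h1 : (k + 1).toNat = k.toNat + 1 := by omega
        rw [h1, List.getElem?_cons_succ]
      rw [hget]
      by_cases hv : (PySem.List.pyGet? xs k).getD 0 = v
      · rw [if_pos hv, if_pos hv,
          ih ((L - (k + 1)).toNat) (by omega) x xs (k + 1) L rfl (by omega)]
      · rw [if_neg hv, if_neg hv]
    · conv_lhs => rw [pvCnt]
      conv_rhs => rw [pvCnt]
      rw [dif_neg (by omega : ¬ k + 1 < L + 1), dif_neg h]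

theorem pvCnt_takeWhile (v : Int) : ∀ (xs : List Int), pvCnt xs v 0 (xs.length : Int) = ((xs.takeWhile (· == v)).length : Int) := by
  intro xs
  induction xs with
  | nil => rw [pvCnt]; simp
  | cons x xs ih =>
    have hlen : ((x :: xs).length : Int) = (xs.length : Int) + 1 := by simp
    rw [hlen, pvCnt, dif_pos (by omega : (0 : Int) < (xs.length : Int) + 1)]
    have hget : (PySem.List.pyGet? (x :: xs) 0).getD 0 = x := by
      rw [PySem.List.pyGet?_zero_cons]; rfl
    rw [hget]
    by_cases hv : x = v
    · rw [if_pos hv, (by ring : (0 : Int) + 1 = 0 + 1),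
        pvCnt_shift v (xs.length : Int).toNat x xs 0 (xs.length : Int) (by omega) (by omega), ih]
      simp [hv]
      omega
    · rw [if_neg hv]
      simp [hv]

theorem pvWhile_shift : ∀ (n : Nat) (x : Int) (xs : List Int) (j L : Int) (sizes : List Int), (L - j).toNat = n → 0 ≤ j → pvWhile (x :: xs) (L + 1) (j + 1) sizes = pvWhile xs L j sizes := by
  intro n
  induction n using Nat.strong_induction_on with
  | _ n ih =>
    intro x xs j L sizes hn hj
    by_cases h : j < L
    · conv_lhs => rw [pvWhile]
      conv_rhs => rw [pvWhile]
      rw [dif_pos (by omega : j + 1 < L + 1), dif_pos h]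
      have hget : (PySem.List.pyGet? (x :: xs) (j + 1)).getD 0 = (PySem.List.pyGet? xs j).getD 0 := by
        rw [PySem.List.pyGet?_of_nonneg _ (by omega), PySem.List.pyGet?_of_nonneg _ hj]
        have h1 : (j + 1).toNat = j.toNat + 1 := by omega
        rw [h1, List.getElem?_cons_succ]
      rw [hget]
      have hc1 : pvCnt (x :: xs) 1 (j + 1 + 1) (L + 1) = pvCnt xs 1 (j + 1) L :=
        pvCnt_shift 1 ((L - (j + 1)).toNat) x xs (j + 1) L rfl (by omega)
      have hc2 : pvCnt (x :: xs) (-1) (j + 1 + 1) (L + 1) = pvCnt xs (-1) (j + 1) L :=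
        pvCnt_shift (-1) ((L - (j + 1)).toNat) x xs (j + 1) L rfl (by omega)
      by_cases hv : (PySem.List.pyGet? xs j).getD 0 = 1
      · rw [if_pos hv, if_pos hv, hc1]
        have harg : j + 1 + (1 + pvCnt xs 1 (j + 1) L) = (j + (1 + pvCnt xs 1 (j + 1) L)) + 1 := by ring
        rw [harg]
        have hcn := pvCnt_nonneg ((L - (j + 1)).toNat) xs 1 (j + 1) L rfl
        exact ih ((L - (j + (1 + pvCnt xs 1 (j + 1) L))).toNat) (by omega) x xs _ L _ rfl (by omega)
      · rw [if_neg hv, if_neg hv]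
        by_cases hw : (PySem.List.pyGet? xs j).getD 0 = -1
        · rw [if_pos hw, if_pos hw, hc2]
          have harg : j + 1 + (1 + pvCnt xs (-1) (j + 1) L) = (j + (1 + pvCnt xs (-1) (j + 1) L)) + 1 := by ring
          rw [harg]
          have hcn := pvCnt_nonneg ((L - (j + 1)).toNat) xs (-1) (j + 1) L rfl
          exact ih ((L - (j + (1 + pvCnt xs (-1) (j + 1) L))).toNat) (by omega) x xs _ L _ rfl (by omega)
        · rw [if_neg hw, if_neg hw]
          have harg : j + 1 + 1 = (j + 1) + 1 := by ring
          rw [harg]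
          exact ih ((L - (j + 1)).toNat) (by omega) x xs (j + 1) L sizes rfl (by omega)
    · conv_lhs => rw [pvWhile]
      conv_rhs => rw [pvWhile]
      rw [dif_neg (by omega : ¬ j + 1 < L + 1), dif_neg h]

theorem pvWhile_drop : ∀ (m : Nat) (d : List Int), m ≤ d.length → ∀ (sizes : List Int), pvWhile d (d.length : Int) (m : Int) sizes = pvWhile (d.drop m) ((d.drop m).length : Int) 0 sizes := by
  intro m
  induction m with
  | zero => intro d _ sizes; simp
  | succ m ih =>
    intro d hm sizes
    match d with
    | x :: xs =>
      have h1 : ((x :: xs).length : Int) = (xs.length : Int) + 1 := by simp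
      have h2 : ((m + 1 : Nat) : Int) = (m : Int) + 1 := by omega
      rw [h1, h2, pvWhile_shift ((xs.length : Int) - (m : Int)).toNat x xs (m : Int) (xs.length : Int) sizes rfl (by omega)]
      simpa using ih xs (by simpa using hm) sizes

theorem dropWhile_eq_drop_tw (p : Int → Bool) : ∀ (xs : List Int), xs.dropWhile p = xs.drop (xs.takeWhile p).length := by
  intro xs
  induction xs with
  | nil => rfl
  | cons y ys ihy => by_cases hy : p y <;> simp [hy, ihy]

theorem pvWhile_runs : ∀ (n : Nat) (d : List Int), d.length = n → ∀ (sizes : List Int), pvWhile d (d.length : Int) 0 sizes = (pvRuns d).foldl (fun acc kc => if kc.1 = 1 ∨ kc.1 = -1 then acc ++ [kc.2] else acc) sizes := by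
  intro n
  induction n using Nat.strong_induction_on with
  | _ n ih =>
    intro d hd sizes
    match d with
    | [] => rw [pvWhile]; simp [pvRuns]
    | x :: xs =>
      have hlen : ((x :: xs).length : Int) = (xs.length : Int) + 1 := by simp
      rw [hlen, pvWhile, dif_pos (by omega : (0 : Int) < (xs.length : Int) + 1)]
      have hget : (PySem.List.pyGet? (x :: xs) 0).getD 0 = x := by
        rw [PySem.List.pyGet?_zero_cons]; rfl
      rw [hget]
      rcases eq_or_ne x 1 with hx1 | hx1
      · rw [if_pos hx1]
        have hc : pvCnt (x :: xs) 1 (0 + 1) ((xs.length : Int) + 1) = ((xs.takeWhile (· == 1)).length : Int) := by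
          rw [(by ring : (0 : Int) + 1 = 0 + 1),
            pvCnt_shift 1 (xs.length : Int).toNat x xs 0 (xs.length : Int) (by omega) (by omega),
            pvCnt_takeWhile]
        rw [hc]
        have hsz : (0 : Int) + (1 + ((xs.takeWhile (· == 1)).length : Int)) = (((1 + (xs.takeWhile (· == 1)).length : Nat)) : Int) := by push_cast; ring
        have hmle : 1 + (xs.takeWhile (· == 1)).length ≤ (x :: xs).length := by
          have := (List.takeWhile_sublist (l := xs) (· == 1)).length_le
          simp only [List.length_cons]; omega
        have hL : ((xs.length : Int) + 1) = (((x :: xs).length : Nat) : Int) := by simp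
        rw [hsz, hL, pvWhile_drop (1 + (xs.takeWhile (· == 1)).length) (x :: xs) hmle]
        have hdrop : (x :: xs).drop (1 + (xs.takeWhile (· == 1)).length) = xs.dropWhile (· == 1) := by
          rw [dropWhile_eq_drop_tw, Nat.add_comm, List.drop_succ_cons]
        rw [hdrop,
          ih (xs.dropWhile (· == 1)).length
            (by have := List.length_dropWhile_le (· == 1) xs; simp at hd; omega)
            (xs.dropWhile (· == 1)) rfl]
        rw [pvRuns]
        subst hx1
        simp [List.foldl_cons]
      · rcases eq_or_ne x (-1) with hx2 | hx2
        · rw [if_neg hx1, if_pos hx2]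
          have hc : pvCnt (x :: xs) (-1) (0 + 1) ((xs.length : Int) + 1) = ((xs.takeWhile (· == -1)).length : Int) := by
            rw [(by ring : (0 : Int) + 1 = 0 + 1),
              pvCnt_shift (-1) (xs.length : Int).toNat x xs 0 (xs.length : Int) (by omega) (by omega),
              pvCnt_takeWhile]
          rw [hc]
          have hsz : (0 : Int) + (1 + ((xs.takeWhile (· == -1)).length : Int)) = (((1 + (xs.takeWhile (· == -1)).length : Nat)) : Int) := by push_cast; ring
          have hmle : 1 + (xs.takeWhile (· == -1)).length ≤ (x :: xs).length := by
            have := (List.takeWhile_sublist (l := xs) (· == -1)).length_le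
            simp only [List.length_cons]; omega
          have hL : ((xs.length : Int) + 1) = (((x :: xs).length : Nat) : Int) := by simp
          rw [hsz, hL, pvWhile_drop (1 + (xs.takeWhile (· == -1)).length) (x :: xs) hmle]
          have hdrop : (x :: xs).drop (1 + (xs.takeWhile (· == -1)).length) = xs.dropWhile (· == -1) := by
            rw [dropWhile_eq_drop_tw, Nat.add_comm, List.drop_succ_cons]
          rw [hdrop,
            ih (xs.dropWhile (· == -1)).length
              (by have := List.length_dropWhile_le (· == -1) xs; simp at hd; omega)
              (xs.dropWhile (· == -1)) rfl]
          rw [pvRuns]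
          subst hx2
          simp [List.foldl_cons]
        · rw [if_neg hx1, if_neg hx2]
          have h01 : (0 : Int) + 1 = ((1 : Nat) : Int) := by norm_num
          have hL : ((xs.length : Int) + 1) = (((x :: xs).length : Nat) : Int) := by simp
          rw [h01, hL, pvWhile_drop 1 (x :: xs) (by simp), List.drop_one, List.tail_cons]
          have hskip : ∀ (t : List Int) (acc : List Int), (∀ y ∈ t, y = x) →
              pvWhile (t ++ xs.dropWhile (· == x)) ((t ++ xs.dropWhile (· == x)).length : Int) 0 acc =
              pvWhile (xs.dropWhile (· == x)) ((xs.dropWhile (· == x)).length : Int) 0 acc := by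
            intro t
            induction t with
            | nil => intro acc _; simp
            | cons y ys ihy =>
              intro acc hall
              have hy : y = x := hall y (by simp)
              have hlen2 : ((y :: (ys ++ xs.dropWhile (· == x))).length : Int) = (((ys ++ xs.dropWhile (· == x)).length) : Int) + 1 := by simp
              rw [List.cons_append, hlen2, pvWhile, dif_pos (by omega : (0 : Int) < (((ys ++ xs.dropWhile (· == x)).length) : Int) + 1)]
              have hget2 : (PySem.List.pyGet? (y :: (ys ++ xs.dropWhile (· == x))) 0).getD 0 = y := by
                rw [PySem.List.pyGet?_zero_cons]; rfl
              rw [hget2, hy, if_neg hx1, if_neg hx2]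
              rw [(by ring : (0 : Int) + 1 = 0 + 1),
                pvWhile_shift ((((ys ++ xs.dropWhile (· == x)).length : Int)) - 0).toNat x
                  (ys ++ xs.dropWhile (· == x)) 0 (((ys ++ xs.dropWhile (· == x)).length : Int)) acc rfl (by omega)]
              exact ihy acc (fun z hz => hall z (by simp [hz]))
          have hdecomp : xs = xs.takeWhile (· == x) ++ xs.dropWhile (· == x) := (List.takeWhile_append_dropWhile (p := (· == x)) (l := xs)).symm
          have hxs := hskip (xs.takeWhile (· == x)) sizes (fun y hy => by
            have := List.mem_takeWhile_imp hy
            simpa using this)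
          conv_lhs => rw [hdecomp]
          rw [hxs,
            ih (xs.dropWhile (· == x)).length
              (by have := List.length_dropWhile_le (· == x) xs; simp at hd; omega)
              (xs.dropWhile (· == x)) rfl]
          rw [pvRuns]
          simp only [List.foldl_cons]
          rw [if_neg (by simpa using And.intro hx1 hx2 |> fun h => (not_or).mpr ⟨hx1, hx2⟩), hdecomp]


-- per-row agreement of A's while loop with B's boundary computation
theorem rowB_eq (matrix : List (List Int)) (i dim2 : Int) (sizes : List Int) :
    pvWhile (pvDiffRow matrix i dim2) dim2 0 sizes = pvRowB matrix i dim2 sizes := by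
  by_cases hpos : 1 ≤ dim2
  · have hlen : ((pvDiffRow matrix i dim2).length : Int) = dim2 := by
      simp [pvDiffRow, PySem.List.length_pyRange_one]
      omega
    have hne : pvDiffRow matrix i dim2 ≠ [] := by
      intro h
      rw [h] at hlen
      simp at hlen
      omega
    rw [pvRowB]
    simp only [if_pos hne]
    have hbounds : [(0 : Int)] ++ ((PySem.List.pyRange 1 dim2 1).filter (fun j =>
        (PySem.List.pyGet? (pvDiffRow matrix i dim2) j).getD 0 !=
        (PySem.List.pyGet? (pvDiffRow matrix i dim2) (j - 1)).getD 0)) ++ [dim2] =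
        pvBnds (pvDiffRow matrix i dim2) := by
      rw [pvBnds, pvChg, hlen]
      rfl
    rw [hbounds]
    set d := pvDiffRow matrix i dim2 with hdd
    rw [← hlen,
      pvWhile_runs d.length d rfl,
      PySem.List.foldl_append_ite (fun (kc : Int × Int) => kc.1 = 1 ∨ kc.1 = -1) (fun kc => kc.2),
      ← pvPairs,
      PySem.List.foldl_append_ite
        (fun (ab : Int × Int) => (PySem.List.pyGet? d ab.1).getD 0 = 1 ∨
          (PySem.List.pyGet? d ab.1).getD 0 = -1)
        (fun ab => ab.2 - ab.1),
      pvRuns_main d.length d rfl]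
  · have hnil : pvDiffRow matrix i dim2 = [] := by
      simp [pvDiffRow, PySem.List.pyRange_one_eq_nil (by omega : dim2 ≤ 0)]
    rw [pvRowB]
    simp only [hnil]
    rw [pvWhile, dif_neg (by omega : ¬ (0 : Int) < dim2)]
    simp

-- ===== VERDICT (by name: the statement is the Claim_ definition above) =====
theorem check_dimensions_spec : Claim_equal_check_dimensions := by
  intro matrix dim1 dim2 _ _
  unfold Spec_check_dimensions check_dimensions check_dimensions_alt
  induction PySem.List.pyRange 0 (dim1 - 1) 1 using List.reverseRecOn with
  | nil => rfl
  | append_singleton l i ihl => rw [List.foldl_append, List.foldl_append, ← ihl]; simp [rowB_eq]
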